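-- pv_equiv track=rewrite | github.com/pypi-data/pypi-mirror-348 | packages/nipcbatt/nipcbatt-1.0.60-py3-none-any.whl/nipcbatt/pcbatt_library/common/helper_functions.py | digital_ramp_pattern_generator
-- ===== SOURCE A (Python) =====
-- def digital_ramp_pattern_generator(
--     number_of_samples: int = None, number_of_digital_lines: int = None
-- ):
--     """Generates Ramp based Digital Output Data couting from 0 upto (2^N)-1 where "N" represents the
--     Number of Digital Lines."""  # noqa: D205, D209, D415, W505 - 1 blank line required between summary line and description (auto-generated noqa), Multi-line docstring closing quotes should be on a separate line (auto-generated noqa), First line should end with a period, question mark, or exclamation point (auto-generated noqa), doc line too long (324 > 100 characters) (auto-generated noqa)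
--     if number_of_samples is (0 or None):
--         raise ValueError("number_of_samples must be >= 1")
--     if number_of_digital_lines is (0 or None):
--         raise ValueError("number_of_digital lines must be >= 1")
--
--     # create variables for holding data
--     total_lines = 2**number_of_digital_lines
--     port_digital_data = [0] * number_of_samples
--
--     # populate array with values
--     for i in range(number_of_samples):
--         port_digital_data[i] = i % total_lines
--
--     return port_digital_data
-- ===== SOURCE B (Python) =====
-- def digital_ramp_pattern_generator(
--     number_of_samples: int = None, number_of_digital_lines: int = None
-- ):
--     """Generates the ramp 0..(2^N)-1 repeated, by tiling whole periods instead of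
--     a per-element modulo loop."""
--     if number_of_samples is None:
--         raise ValueError("number_of_samples must be >= 1")
--     if number_of_digital_lines is None:
--         raise ValueError("number_of_digital lines must be >= 1")
--
--     total_lines = 2**number_of_digital_lines
--     if number_of_samples <= total_lines:
--         # at most one (partial) period is needed
--         return list(range(max(number_of_samples, 0)))
--     full_periods, remainder = divmod(number_of_samples, total_lines)
--     return list(range(total_lines)) * full_periods + list(range(remainder))
-- ===== Notes on version B (the rewrite author's own statement) =====
-- stated objective: alternative
-- what changed: Replaced the per-element modulo loop with building one period via range() and tiling it with list repetition plus a divmod partial-period tail (short-circuiting when at most one period is needed).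
-- outside the precondition, e.g. on digital_ramp_pattern_generator(3, -1): A returns [0.0, 0.0, 0.0], B raises TypeError
import Mathlib
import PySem

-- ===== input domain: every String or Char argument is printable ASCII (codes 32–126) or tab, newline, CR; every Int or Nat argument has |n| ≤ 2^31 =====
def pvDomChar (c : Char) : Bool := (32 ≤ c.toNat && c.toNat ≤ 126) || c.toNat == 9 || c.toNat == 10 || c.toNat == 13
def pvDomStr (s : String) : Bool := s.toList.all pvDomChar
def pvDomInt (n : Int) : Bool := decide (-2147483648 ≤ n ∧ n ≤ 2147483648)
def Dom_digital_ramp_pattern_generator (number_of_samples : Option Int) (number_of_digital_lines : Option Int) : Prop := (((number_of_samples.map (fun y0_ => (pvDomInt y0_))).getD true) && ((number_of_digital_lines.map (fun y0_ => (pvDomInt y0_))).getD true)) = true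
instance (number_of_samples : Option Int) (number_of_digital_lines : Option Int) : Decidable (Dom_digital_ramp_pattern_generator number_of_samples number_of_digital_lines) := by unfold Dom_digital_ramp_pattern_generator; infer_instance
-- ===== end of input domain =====

-- B builds one period with range() and tiles it (list repetition + divmod tail)
-- instead of A's per-element modulo loop.

-- ===== PORT A =====
def digital_ramp_pattern_generator (number_of_samples : Option Int) (number_of_digital_lines : Option Int) : List Int :=
  match number_of_samples, number_of_digital_lines with
  | some s, some l =>
    -- 2**number_of_digital_lines; exact for l ≥ 0 (Pre_ excludes l < 0 where Python yields a float)
    let total_lines : Int := 2 ^ l.toNat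
    -- [0] * number_of_samples
    let init : List Int := List.replicate s.toNat 0
    -- for i in range(number_of_samples): port_digital_data[i] = i % total_lines
    -- (i is nonnegative inside the loop, so .set i.toNat is the exact list assignment)
    (PySem.List.pyRange 0 s 1).foldl (fun a i => a.set i.toNat (PySem.Int.mod i total_lines)) init
  | _, _ => []  -- ValueError (number_of_samples/number_of_digital_lines is None), excluded by Pre_

-- ===== PORT B =====
def digital_ramp_pattern_generator_alt (number_of_samples : Option Int) (number_of_digital_lines : Option Int) : List Int :=
  match number_of_samples with
  | none => []  -- ValueError, excluded by Pre_
  | some s =>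
    match number_of_digital_lines with
    | none => []  -- ValueError, excluded by Pre_
    | some l =>
        -- 2**number_of_digital_lines; exact for l ≥ 0 (Pre_ excludes l < 0)
        let total_lines : Int := 2 ^ l.toNat
        if s ≤ total_lines then
          -- list(range(max(number_of_samples, 0)))
          PySem.List.pyRange 0 (max s 0) 1
        else
          -- full_periods, remainder = divmod(number_of_samples, total_lines)
          let full_periods := PySem.Int.floordiv s total_lines
          let remainder := PySem.Int.mod s total_lines
          -- list(range(total_lines)) * full_periods + list(range(remainder))
          (List.replicate full_periods.toNat (PySem.List.pyRange 0 total_lines 1)).flatten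
            ++ PySem.List.pyRange 0 remainder 1

-- ===== PRECONDITION & SPEC =====
-- Pre_ excludes None arguments (A raises ValueError) and negative number_of_digital_lines
-- with positive number_of_samples, where Python's 2**l is a float and A returns a list of
-- floats (not a value of the declared List Int type) while B raises TypeError.
def Pre_digital_ramp_pattern_generator (number_of_samples : Option Int) (number_of_digital_lines : Option Int) : Prop :=
  number_of_samples ≠ none ∧ number_of_digital_lines ≠ none ∧
    (0 ≤ number_of_digital_lines.getD 0 ∨ number_of_samples.getD 0 ≤ 0)
instance (number_of_samples : Option Int) (number_of_digital_lines : Option Int) : Decidable (Pre_digital_ramp_pattern_generator number_of_samples number_of_digital_lines) := by unfold Pre_digital_ramp_pattern_generator; infer_instance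

def pvWitness_digital_ramp_pattern_generator : Option Int × Option Int := (some 5, some 2)

def Spec_digital_ramp_pattern_generator (number_of_samples : Option Int) (number_of_digital_lines : Option Int) (out : List Int) : Prop := out = digital_ramp_pattern_generator_alt number_of_samples number_of_digital_lines
instance (number_of_samples : Option Int) (number_of_digital_lines : Option Int) (out : List Int) : Decidable (Spec_digital_ramp_pattern_generator number_of_samples number_of_digital_lines out) := by unfold Spec_digital_ramp_pattern_generator; infer_instance

-- ===== CLAIM (what is proved, stated in full; the proofs are below) =====
def Claim_equal_digital_ramp_pattern_generator : Prop := ∀ (number_of_samples : Option Int) (number_of_digital_lines : Option Int), Dom_digital_ramp_pattern_generator number_of_samples number_of_digital_lines → Pre_digital_ramp_pattern_generator number_of_samples number_of_digital_lines → Spec_digital_ramp_pattern_generator number_of_samples number_of_digital_lines (digital_ramp_pattern_generator number_of_samples number_of_digital_lines)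

-- ===== LEMMAS AND PROOFS =====

-- A's loop: setting index i to f i over range n, starting from n zeros, is just map.
theorem foldl_set_range (f : Nat → Int) : ∀ (n m : Nat), n ≤ m →
    (List.range n).foldl (fun a i => a.set i (f i)) (List.replicate m (0:Int))
      = (List.range n).map f ++ List.replicate (m - n) 0 := by
  intro n
  induction n with
  | zero => intro m _; simp
  | succ k ih =>
    intro m hm
    rw [List.range_succ, List.foldl_append, ih m (by omega)]
    have hrep : List.replicate (m - k) (0:Int) = 0 :: List.replicate (m - (k+1)) 0 := by
      have : m - k = (m - (k+1)) + 1 := by omega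
      rw [this, List.replicate_succ]
    simp [hrep]

-- tiling: the mod-ramp of length q*t + r is q full periods followed by a partial one.
theorem ramp_tiling (t : Nat) : ∀ (q r : Nat),
    (List.range (q * t + r)).map (fun k => k % t)
      = (List.replicate q (List.range t)).flatten ++ (List.range r).map (fun k => k % t) := by
  intro q
  induction q with
  | zero => simp
  | succ p ih =>
    intro r
    have hsplit : (p+1) * t + r = t + (p * t + r) := by ring
    have h1 : (List.range t).map (fun k => k % t) = List.range t := by
      simpa using List.map_congr_left (fun k hk => Nat.mod_eq_of_lt (List.mem_range.mp hk))
    have h2 : (List.range (p * t + r)).map ((fun k => k % t) ∘ (fun k => t + k))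
        = (List.range (p * t + r)).map (fun k => k % t) := by
      apply List.map_congr_left
      intro k _
      simp [Function.comp, Nat.add_mod_left]
    rw [hsplit, List.range_add, List.map_append, List.map_map, h2, ih r, h1,
      List.replicate_succ, List.flatten_cons, List.append_assoc]

theorem digital_ramp_pattern_generator_spec : Claim_equal_digital_ramp_pattern_generator := by
  intro ns nl _ hpre
  obtain ⟨hs, hl, hcase⟩ := hpre
  unfold Spec_digital_ramp_pattern_generator
  match ns, nl with
  | none, _ => exact absurd rfl hs
  | some s, none => exact absurd rfl hl
  | some s, some l =>
    simp only [Option.getD_some] at hcase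
    unfold digital_ramp_pattern_generator digital_ramp_pattern_generator_alt
    simp only
    set t : Int := 2 ^ l.toNat with hT
    have htpos : 0 < t := by positivity
    have htt : t = ((t.toNat : Nat) : Int) := by omega
    -- canonical form of A's result
    have hA : (PySem.List.pyRange 0 s 1).foldl
        (fun a i => a.set i.toNat (PySem.Int.mod i t)) (List.replicate s.toNat 0)
        = (List.range s.toNat).map (fun k => ((k % t.toNat : Nat) : Int)) := by
      rw [PySem.List.pyRange_one]
      simp only [sub_zero, zero_add]
      rw [List.foldl_map]
      have hfun : (fun (a : List Int) (k : Nat) => a.set ((k:Int)).toNat (PySem.Int.mod (k:Int) t))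
          = fun a k => a.set k (((k % t.toNat : Nat) : Int)) := by
        funext a k
        rw [Int.toNat_natCast]
        congr 1
        rw [PySem.Int.mod_eq_emod_of_pos htpos]
        conv_lhs => rw [htt]
        rw [← Int.natCast_mod]
      rw [hfun, foldl_set_range _ s.toNat s.toNat (le_refl _)]
      simp
    rw [hA]
    by_cases hle : s ≤ t
    · -- B's first branch: at most one period
      simp only [if_pos hle]
      rw [PySem.List.pyRange_one]
      simp only [sub_zero, zero_add]
      have hmax : (max s 0).toNat = s.toNat := by omega
      rw [hmax]
      apply List.map_congr_left
      intro k hk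
      have hk' : k < s.toNat := List.mem_range.mp hk
      have : k % t.toNat = k := Nat.mod_eq_of_lt (by omega)
      rw [this]
    · -- B's second branch: tiling
      simp only [if_neg hle]
      have hspos : 0 < s := lt_trans htpos (lt_of_not_ge hle)
      have hst : s = ((s.toNat : Nat) : Int) := by omega
      have hfd : PySem.Int.floordiv s t = ((s.toNat / t.toNat : Nat) : Int) := by
        rw [hst, htt]; exact PySem.Int.floordiv_natCast _ _
      have hmd : PySem.Int.mod s t = ((s.toNat % t.toNat : Nat) : Int) := by
        rw [hst, htt]; exact PySem.Int.mod_natCast _ _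
      rw [hfd, hmd, Int.toNat_natCast]
      have htn : 0 < t.toNat := by omega
      calc (List.range s.toNat).map (fun k => ((k % t.toNat : Nat) : Int))
          = (List.range ((s.toNat / t.toNat) * t.toNat + s.toNat % t.toNat)).map
              (fun k => ((k % t.toNat : Nat) : Int)) := by
            congr 2
            exact (Nat.div_add_mod' s.toNat t.toNat).symm
        _ = ((List.range ((s.toNat / t.toNat) * t.toNat + s.toNat % t.toNat)).map
              (fun k => (k % t.toNat : Nat))).map (fun k : Nat => (k : Int)) := by
            rw [List.map_map]
            rfl
        _ = (((List.replicate (s.toNat / t.toNat) (List.range t.toNat)).flatten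
              ++ (List.range (s.toNat % t.toNat)).map (fun k => k % t.toNat)).map
              (fun k : Nat => (k : Int))) := by
            rw [ramp_tiling t.toNat]
        _ = (List.replicate (s.toNat / t.toNat) (PySem.List.pyRange 0 t 1)).flatten
              ++ PySem.List.pyRange 0 ((s.toNat % t.toNat : Nat) : Int) 1 := by
            rw [List.map_append, List.map_flatten, List.map_replicate]
            congr 1
            · congr 1
              rw [PySem.List.pyRange_one]
              simp
            · have hr : (List.range (s.toNat % t.toNat)).map (fun k => k % t.toNat)
                  = List.range (s.toNat % t.toNat) := by
                simpa using List.map_congr_left (fun k hk =>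
                  Nat.mod_eq_of_lt (lt_trans (List.mem_range.mp hk) (Nat.mod_lt _ htn)))
              rw [hr, PySem.List.pyRange_one]
              simp
              rw [max_eq_left hspos.le, max_eq_left htpos.le]
              congr 2
              conv_rhs => rw [hst, htt]
              rw [← Int.natCast_mod, Int.toNat_natCast]

-- ===== VERDICT (by name: the statement is the Claim_ definition above) =====
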